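-- pv_equiv track=rewrite | github.com/NavidNaf/CTF-Solve-with-Codes | kshackzone/programming/knight-square-sum.py | find_square_pairs
-- ===== SOURCE A (Python) =====
-- import math
--
-- def find_square_pairs(target: int) -> list[tuple[int, int]]:
--     """Return all non-negative integer pairs (a, b) with a^2 + b^2 == target."""
--     if target < 0:  # Negative numbers cannot be expressed as sum of two squares.
--         return []  # Early exit with no pairs for invalid input.
--
--     limit = math.isqrt(target)  # We only need to search up to sqrt(target).
--     pairs = []  # Collect matching pairs (a, b) here.
--
--     for a in range(limit + 1):  # Iterate all candidate values of a.
--         remainder = target - a * a  # Compute the remaining value to match b^2.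
--         b = math.isqrt(remainder)  # Calculate the integer square root candidate for b.
--         if b * b == remainder and a <= b:  # Check exact square and avoid duplicate permutations.
--             pairs.append((a, b))  # Store the valid pair.
--
--     return pairs  # Return all discovered pairs.
-- ===== SOURCE B (Python) =====
-- import math
--
-- def find_square_pairs(target: int) -> list[tuple[int, int]]:
--     """Return all non-negative integer pairs (a, b) with a^2 + b^2 == target."""
--     if target < 0:
--         return []
--     a, b = 0, math.isqrt(target)
--     pairs = []
--     while a <= b:
--         s = a * a + b * b
--         if s == target:
--             pairs.append((a, b))
--             a += 1
--             b -= 1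
--         elif s < target:
--             a += 1
--         else:
--             b -= 1
--     return pairs
-- ===== Notes on version B (the rewrite author's own statement) =====
-- stated objective: alternative
-- what changed: Replaced A's scan that calls isqrt(target - a*a) for every candidate a with a two-pointer sweep: one isqrt call for the initial upper bound, then both bounds move inward by comparing a*a + b*b against target.
import Mathlib
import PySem

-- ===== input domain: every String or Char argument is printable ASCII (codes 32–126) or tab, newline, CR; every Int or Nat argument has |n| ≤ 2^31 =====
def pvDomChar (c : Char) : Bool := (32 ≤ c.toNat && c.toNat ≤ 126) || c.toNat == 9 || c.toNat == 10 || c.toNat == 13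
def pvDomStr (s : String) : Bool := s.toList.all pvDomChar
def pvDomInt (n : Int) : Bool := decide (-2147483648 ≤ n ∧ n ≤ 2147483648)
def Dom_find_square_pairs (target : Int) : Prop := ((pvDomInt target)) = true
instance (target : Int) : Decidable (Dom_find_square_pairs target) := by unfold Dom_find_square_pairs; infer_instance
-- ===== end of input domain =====

-- B replaces A's per-candidate isqrt perfect-square test with a two-pointer sweep
-- calling isqrt once (alternative algorithm of the same asymptotic cost).

-- ===== PORT A =====
-- math.isqrt is only applied to nonnegative arguments here (target ≥ 0 and
-- remainder = target - a*a ≥ 0 for a ≤ isqrt target), where Int.sqrt is exact.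
def find_square_pairs (target : Int) : List (Int × Int) :=
  if target < 0 then []
  else
    let limit := Int.sqrt target
    (PySem.List.pyRange 0 (limit + 1) 1).foldl
      (fun pairs a =>
        let remainder := target - a * a
        let b := Int.sqrt remainder
        if b * b = remainder ∧ a ≤ b then pairs ++ [(a, b)] else pairs)
      []

-- ===== PORT B =====
-- the 'while a <= b' loop of Source B; terminates because b + 1 - a shrinks each step
def fspLoop (target a b : Int) (pairs : List (Int × Int)) : List (Int × Int) :=
  if h : a ≤ b then
    let s := a * a + b * b
    if s = target then fspLoop target (a + 1) (b - 1) (pairs ++ [(a, b)])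
    else if s < target then fspLoop target (a + 1) b pairs
    else fspLoop target a (b - 1) pairs
  else pairs
termination_by (b + 1 - a).toNat
decreasing_by all_goals omega

def find_square_pairs_alt (target : Int) : List (Int × Int) :=
  if target < 0 then []
  else fspLoop target 0 (Int.sqrt target) []

-- ===== PRECONDITION & SPEC =====
def Spec_find_square_pairs (target : Int) (out : List (Int × Int)) : Prop := out = find_square_pairs_alt target
instance (target : Int) (out : List (Int × Int)) : Decidable (Spec_find_square_pairs target out) := by unfold Spec_find_square_pairs; infer_instance

-- ===== CLAIM (what is proved, stated in full; the proofs are below) =====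
def Claim_equal_find_square_pairs : Prop := ∀ (target : Int), Dom_find_square_pairs target → Spec_find_square_pairs target (find_square_pairs target)

-- ===== LEMMAS AND PROOFS =====

-- what A's loop body appends for candidate x
def fspEmit (target x : Int) : List (Int × Int) :=
  if Int.sqrt (target - x * x) * Int.sqrt (target - x * x) = target - x * x
      ∧ x ≤ Int.sqrt (target - x * x) then
    [(x, Int.sqrt (target - x * x))]
  else []

theorem isqrt_bounds (n : Int) (h : 0 ≤ n) :
    Int.sqrt n * Int.sqrt n ≤ n ∧ n < (Int.sqrt n + 1) * (Int.sqrt n + 1) := by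
  unfold Int.sqrt
  have h1 := Nat.sqrt_le' n.toNat
  have h2 := Nat.lt_succ_sqrt' n.toNat
  rw [pow_two] at h1 h2
  constructor
  · have : ((n.toNat.sqrt * n.toNat.sqrt : Nat) : Int) ≤ ((n.toNat : Nat) : Int) := by exact_mod_cast h1
    push_cast at this ⊢; omega
  · have : ((n.toNat : Nat) : Int) < ((n.toNat.sqrt.succ * n.toNat.sqrt.succ : Nat) : Int) := by exact_mod_cast h2
    push_cast at this ⊢; omega

theorem isqrt_sq (b : Int) (h : 0 ≤ b) : Int.sqrt (b * b) = b := by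
  rw [Int.sqrt_eq]; omega

-- emit x is empty when no partner b' ≤ b remains (s < target) or x has passed b
theorem fspEmit_eq_nil (target x b : Int) (hx : 0 ≤ x) (hb : -1 ≤ b)
    (hlt : target < x * x + (b + 1) * (b + 1)) (hgt : x * x + b * b < target ∨ b < x) :
    fspEmit target x = [] := by
  unfold fspEmit
  rw [if_neg]
  rintro ⟨hsq, hle⟩
  have hy0 : 0 ≤ Int.sqrt (target - x * x) := Int.sqrt_nonneg _
  set y := Int.sqrt (target - x * x) with hy
  have hyb : y ≤ b := by nlinarith
  rcases hgt with hlt2 | hblt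
  · nlinarith
  · omega

theorem fspEmit_pair (target a b : Int) (ha : 0 ≤ a) (hab : a ≤ b)
    (hs : a * a + b * b = target) : fspEmit target a = [(a, b)] := by
  unfold fspEmit
  have hb0 : 0 ≤ b := by omega
  have hr : target - a * a = b * b := by omega
  rw [hr, isqrt_sq b hb0]
  simp [hab]

-- the accumulator of B's loop is only ever appended to
theorem fspLoop_acc_aux (target : Int) : ∀ (n : Nat) (a b : Int), (b + 1 - a).toNat ≤ n →
    ∀ pairs, fspLoop target a b pairs = pairs ++ fspLoop target a b [] := by
  intro n
  induction n with
  | zero =>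
      intro a b hn pairs
      conv_lhs => rw [fspLoop]
      conv_rhs => rw [fspLoop]
      simp [show ¬ a ≤ b by omega]
  | succ n ih =>
      intro a b hn pairs
      by_cases hab : a ≤ b
      · conv_lhs => rw [fspLoop]
        conv_rhs => rw [fspLoop]
        simp only [dif_pos hab]
        by_cases hs : a * a + b * b = target
        · simp only [if_pos hs]
          rw [ih (a + 1) (b - 1) (by omega) (pairs ++ [(a, b)]),
              ih (a + 1) (b - 1) (by omega) ([] ++ [(a, b)])]
          simp
        · simp only [if_neg hs]
          by_cases hlt : a * a + b * b < target
          · simp only [if_pos hlt]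
            rw [ih (a + 1) b (by omega) pairs]
          · simp only [if_neg hlt]
            rw [ih a (b - 1) (by omega) pairs]
      · conv_lhs => rw [fspLoop]
        conv_rhs => rw [fspLoop]
        simp [hab]

theorem fspLoop_acc (target a b : Int) (pairs : List (Int × Int)) :
    fspLoop target a b pairs = pairs ++ fspLoop target a b [] :=
  fspLoop_acc_aux target (b + 1 - a).toNat a b le_rfl pairs

-- main invariant: B's sweep from (a, b) produces exactly A's emissions for x ∈ [a, limit]
theorem fspLoop_eq_flatMap (target : Int) (L : Int) (hL : L = Int.sqrt target) :
    ∀ (n : Nat) (a b : Int), (b + 1 - a).toNat ≤ n → 0 ≤ a → -1 ≤ b → b ≤ L →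
      target < a * a + (b + 1) * (b + 1) →
      fspLoop target a b [] = (PySem.List.pyRange a (L + 1) 1).flatMap (fspEmit target) := by
  intro n
  induction n with
  | zero =>
      intro a b hn ha hb hbL hinv
      rw [fspLoop]
      simp only [dif_neg (by omega : ¬ a ≤ b)]
      symm
      rw [List.flatMap_eq_nil_iff]
      intro x hx
      rw [PySem.List.mem_pyRange_one] at hx
      exact fspEmit_eq_nil target x b (by omega) hb
        (by nlinarith [hx.1, hx.2]) (Or.inr (by omega))
  | succ n ih =>
      intro a b hn ha hb hbL hinv
      by_cases hab : a ≤ b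
      · have hb0 : 0 ≤ b := by omega
        have haL : a < L + 1 := by omega
        rw [PySem.List.pyRange_one_cons haL, List.flatMap_cons]
        conv_lhs => rw [fspLoop]
        simp only [dif_pos hab]
        by_cases hs : a * a + b * b = target
        · rw [if_pos hs]
          rw [fspLoop_acc, fspEmit_pair target a b ha hab hs]
          simp only [List.nil_append, List.cons_append, List.nil_append]
          congr 1
          exact ih (a + 1) (b - 1) (by omega) (by omega) (by omega) (by omega)
            (by nlinarith)
        · rw [if_neg hs]
          by_cases hlt : a * a + b * b < target
          · rw [if_pos hlt]
            rw [fspEmit_eq_nil target a b ha hb hinv (Or.inl hlt), List.nil_append]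
            exact ih (a + 1) b (by omega) (by omega) hb hbL (by nlinarith)
          · rw [if_neg hlt]
            -- b pairs with no x ≥ a (s exceeds target): shrink b, same emissions
            rw [ih a (b - 1) (by omega) ha (by omega) (by omega)
              (by rw [show b - 1 + 1 = b from by ring]; omega)]
            rw [PySem.List.pyRange_one_cons haL, List.flatMap_cons]
      · rw [fspLoop]
        simp only [dif_neg hab]
        symm
        rw [List.flatMap_eq_nil_iff]
        intro x hx
        rw [PySem.List.mem_pyRange_one] at hx
        exact fspEmit_eq_nil target x b (by omega) hb
          (by nlinarith [hx.1, hx.2]) (Or.inr (by omega))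

-- A's foldl is the flatMap of its emissions
theorem foldA_eq_flatMap (target : Int) (L : Int) :
    (PySem.List.pyRange 0 (L + 1) 1).foldl
      (fun pairs a =>
        let remainder := target - a * a
        let b := Int.sqrt remainder
        if b * b = remainder ∧ a ≤ b then pairs ++ [(a, b)] else pairs)
      [] = (PySem.List.pyRange 0 (L + 1) 1).flatMap (fspEmit target) := by
  have hfun : (fun (pairs : List (Int × Int)) (a : Int) =>
      let remainder := target - a * a
      let b := Int.sqrt remainder
      if b * b = remainder ∧ a ≤ b then pairs ++ [(a, b)] else pairs)
      = (fun pairs a => pairs ++ fspEmit target a) := by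
    funext pairs a
    show (if Int.sqrt (target - a * a) * Int.sqrt (target - a * a) = target - a * a
        ∧ a ≤ Int.sqrt (target - a * a) then pairs ++ [(a, Int.sqrt (target - a * a))] else pairs)
      = pairs ++ fspEmit target a
    by_cases hc : Int.sqrt (target - a * a) * Int.sqrt (target - a * a) = target - a * a
        ∧ a ≤ Int.sqrt (target - a * a)
    · simp [fspEmit, hc]
    · simp [fspEmit, hc]
  rw [hfun, PySem.List.foldl_append_eq_flatMap]
  simp

-- ===== VERDICT (by name: the statement is the Claim_ definition above) =====
theorem find_square_pairs_spec : Claim_equal_find_square_pairs := by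
  intro target _
  unfold Spec_find_square_pairs find_square_pairs find_square_pairs_alt
  by_cases hneg : target < 0
  · simp [hneg]
  · simp only [if_neg hneg]
    have h0 : (0:Int) ≤ target := by omega
    have hbounds := isqrt_bounds target h0
    rw [foldA_eq_flatMap]
    symm
    exact fspLoop_eq_flatMap target (Int.sqrt target) rfl
      (Int.sqrt target + 1 - 0).toNat 0 (Int.sqrt target)
      (by omega) le_rfl (by have := Int.sqrt_nonneg target; omega) le_rfl
      (by simpa using hbounds.2)
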